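-- pv_equiv track=rewrite | github.com/pypi-data/pypi-mirror-210 | packages/numtoname/numtoname-0.1.2.tar.gz/numtoname-0.1.2/numtoname/functions.py | generate_name_fixed
-- ===== SOURCE A (Python) =====
-- def generate_name_fixed(num: int, char_order: str, char_length: int):
--     if num < 1 or char_order is None or len(char_order) < 1 or char_length < 1:
--         return ''
--
--     name_string = ""
--     running_length = num
--     char_num = len(char_order)
--     for i in range(char_length):
--         if running_length > 1 and running_length > (char_num ** (char_length - i - 1)):
--             for j in range(char_num):
--                 if running_length > ((char_num - j - 1) * (char_num ** (char_length - i - 1))):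
--                     name_string += char_order[(char_num - j - 1)]
--                     running_length -= ((char_num - j - 1) * (char_num ** (char_length - i - 1)))
--                     break
--         else:
--             name_string += char_order[0]
--
--     return name_string
-- ===== SOURCE B (Python) =====
-- def generate_name_fixed(num: int, char_order: str, char_length: int):
--     if num < 1 or char_order is None or len(char_order) < 1 or char_length < 1:
--         return ''
--     n = len(char_order)
--     x = min(num, n ** char_length) - 1
--     digits = []
--     for _ in range(char_length):
--         digits.append(char_order[x % n])
--         x //= n
--     return ''.join(reversed(digits))
-- ===== Notes on version B (the rewrite author's own statement) =====
-- stated objective: faster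
-- what changed: Each output character is computed directly by divmod on the (clamped) zero-based number instead of A's per-position linear scan over all len(char_order) candidate digits with repeated exponentiations.
import Mathlib
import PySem

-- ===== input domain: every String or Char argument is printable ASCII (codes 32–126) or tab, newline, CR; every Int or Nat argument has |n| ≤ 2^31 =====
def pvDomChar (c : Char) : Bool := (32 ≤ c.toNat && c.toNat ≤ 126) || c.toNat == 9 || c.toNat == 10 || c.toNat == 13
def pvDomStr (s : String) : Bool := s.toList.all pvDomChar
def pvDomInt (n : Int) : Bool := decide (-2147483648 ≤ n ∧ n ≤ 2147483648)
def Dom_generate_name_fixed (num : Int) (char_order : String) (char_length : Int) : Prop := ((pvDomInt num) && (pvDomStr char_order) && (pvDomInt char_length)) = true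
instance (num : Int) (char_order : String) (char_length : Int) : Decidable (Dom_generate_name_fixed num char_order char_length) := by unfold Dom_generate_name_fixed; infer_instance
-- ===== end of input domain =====

-- B replaces A's per-position linear scan over all len(char_order) candidate digits by direct
-- divmod extraction of each digit from the (clamped) zero-based number; return values agree everywhere.

-- ===== PORT A =====
-- inner 'for j in range(char_num): if …: name_string += …; running_length -= …; break'
-- (the index char_num - j - 1 is always in range here, so Python never raises and '.getD' is never hit)
def pvInnerScan (cs : List Char) (char_num p : Int) : List Int → List Char → Int → List Char × Int
  | [], name_string, running_length => (name_string, running_length)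
  | j :: rest, name_string, running_length =>
      if running_length > (char_num - j - 1) * p then
        (name_string ++ [(PySem.List.pyGet? cs (char_num - j - 1)).getD ' '],
         running_length - (char_num - j - 1) * p)
      else pvInnerScan cs char_num p rest name_string running_length

-- 'char_order is None' is not representable for a String argument and is dropped.
-- 'char_num ** (char_length - i - 1)': the exponent is ≥ 0 for every i in range(char_length),
-- so '.toNat' is exact there.
def generate_name_fixed (num : Int) (char_order : String) (char_length : Int) : String :=
  if num < 1 ∨ PySem.Str.len char_order < 1 ∨ char_length < 1 then "" else
    let cs := char_order.toList
    let char_num : Int := PySem.Str.len char_order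
    let st := (PySem.List.pyRange 0 char_length 1).foldl
      (fun (st : List Char × Int) i =>
        if st.2 > 1 ∧ st.2 > char_num ^ (char_length - i - 1).toNat then
          pvInnerScan cs char_num (char_num ^ (char_length - i - 1).toNat)
            (PySem.List.pyRange 0 char_num 1) st.1 st.2
        else
          (st.1 ++ [(PySem.List.pyGet? cs 0).getD ' '], st.2))
      ([], num)
    String.ofList st.1

-- ===== PORT B =====
-- 'n ** char_length' has exponent ≥ 1 in this branch, so '.toNat' is exact; x stays ≥ 0,
-- so the index x % n is always in range and '.getD' is never hit.
def generate_name_fixed_alt (num : Int) (char_order : String) (char_length : Int) : String :=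
  if num < 1 ∨ PySem.Str.len char_order < 1 ∨ char_length < 1 then "" else
    let cs := char_order.toList
    let n : Int := PySem.Str.len char_order
    let st := (PySem.List.pyRange 0 char_length 1).foldl
      (fun (st : List Char × Int) _ =>
        (st.1 ++ [(PySem.List.pyGet? cs (PySem.Int.mod st.2 n)).getD ' '],
         PySem.Int.floordiv st.2 n))
      ([], min num (n ^ char_length.toNat) - 1)
    String.ofList st.1.reverse

-- ===== PRECONDITION & SPEC =====
def Spec_generate_name_fixed (num : Int) (char_order : String) (char_length : Int) (out : String) : Prop := out = generate_name_fixed_alt num char_order char_length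
instance (num : Int) (char_order : String) (char_length : Int) (out : String) : Decidable (Spec_generate_name_fixed num char_order char_length out) := by unfold Spec_generate_name_fixed; infer_instance

-- ===== CLAIM (what is proved, stated in full; the proofs are below) =====
def Claim_equal_generate_name_fixed : Prop := ∀ (num : Int) (char_order : String) (char_length : Int), Dom_generate_name_fixed num char_order char_length → Spec_generate_name_fixed num char_order char_length (generate_name_fixed num char_order char_length)

-- ===== LEMMAS AND PROOFS =====

-- the base-N digits (most significant first) of x over k positions
def pvMsb (N : Int) : Nat → Int → List Int
  | 0, _ => []
  | k+1, x => PySem.Int.floordiv x (N ^ k) :: pvMsb N k (PySem.Int.mod x (N ^ k))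

-- the base-N digits (least significant first) of x over k positions
def pvLsb (N : Int) : Nat → Int → List Int
  | 0, _ => []
  | k+1, x => PySem.Int.mod x N :: pvLsb N k (PySem.Int.floordiv x N)

theorem pvDivDiv (x N : Int) (k : Nat) (hN : 0 < N) : x / N ^ (k+1) = x / N / N ^ k := by
  rw [pow_succ' N k]
  exact (Int.ediv_ediv_of_nonneg (by omega)).symm

theorem pvModDiv (x N : Int) (k : Nat) (hN : 0 < N) : (x % N ^ (k+1)) / N = (x / N) % N ^ k := by
  have h1 : x % N ^ (k+1) = x + (-(N ^ k * (x / N ^ (k+1)))) * N := by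
    rw [Int.emod_def]; ring
  rw [h1, Int.add_mul_ediv_right _ _ (by omega : (N:Int) ≠ 0), pvDivDiv x N k hN, Int.emod_def]
  ring

theorem pvFdEq {a b q : Int} (hb : 0 < b) (h1 : q * b ≤ a) (h2 : a < (q+1) * b) :
    PySem.Int.floordiv a b = q :=
  (PySem.Int.floordiv_eq_iff_of_pos hb).mpr ⟨h1, h2⟩

theorem pvMdEq {a b q : Int} (hb : 0 < b) (hq : PySem.Int.floordiv a b = q) :
    PySem.Int.mod a b = a - q * b := by
  rw [PySem.Int.mod_eq_emod_of_pos hb, Int.emod_def]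
  rw [PySem.Int.floordiv_eq_ediv_of_pos hb] at hq
  rw [hq]; ring

theorem pvMsb_snoc (N : Int) (hN : 1 ≤ N) :
    ∀ (k : Nat) (x : Int), 0 ≤ x → x < N ^ (k + 1) →
      pvMsb N (k + 1) x = pvMsb N k (PySem.Int.floordiv x N) ++ [PySem.Int.mod x N] := by
  intro k
  induction k with
  | zero =>
      intro x h0 hx
      rw [pow_one] at hx
      have e1 : PySem.Int.floordiv x (N ^ 0) = x := by
        rw [pow_zero, PySem.Int.floordiv_eq_ediv_of_pos (by omega : (0:Int) < 1), Int.ediv_one]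
      have e2 : PySem.Int.mod x N = x := by
        rw [PySem.Int.mod_eq_emod_of_pos (by omega : (0:Int) < N), Int.emod_eq_of_lt h0 hx]
      show PySem.Int.floordiv x (N ^ 0) :: pvMsb N 0 (PySem.Int.mod x (N ^ 0))
          = pvMsb N 0 (PySem.Int.floordiv x N) ++ [PySem.Int.mod x N]
      rw [e1, e2]
      rfl
  | succ k ih =>
      intro x h0 hx
      have hN0 : (0:Int) < N := by omega
      have hp0 : (0:Int) < N ^ k := by positivity
      have hp1 : (0:Int) < N ^ (k+1) := by positivity
      have hmnn : 0 ≤ PySem.Int.mod x (N ^ (k+1)) := by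
        rw [PySem.Int.mod_eq_emod_of_pos hp1]; exact Int.emod_nonneg x (by omega)
      have hmlt : PySem.Int.mod x (N ^ (k+1)) < N ^ (k+1) := by
        rw [PySem.Int.mod_eq_emod_of_pos hp1]; exact Int.emod_lt_of_pos x hp1
      have e1 : PySem.Int.floordiv x (N ^ (k+1))
          = PySem.Int.floordiv (PySem.Int.floordiv x N) (N ^ k) := by
        rw [PySem.Int.floordiv_eq_ediv_of_pos hp1, PySem.Int.floordiv_eq_ediv_of_pos hN0,
            PySem.Int.floordiv_eq_ediv_of_pos hp0]
        exact pvDivDiv x N k hN0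
      have e2 : PySem.Int.floordiv (PySem.Int.mod x (N ^ (k+1))) N
          = PySem.Int.mod (PySem.Int.floordiv x N) (N ^ k) := by
        rw [PySem.Int.mod_eq_emod_of_pos hp1, PySem.Int.mod_eq_emod_of_pos hp0,
            PySem.Int.floordiv_eq_ediv_of_pos hN0, PySem.Int.floordiv_eq_ediv_of_pos hN0]
        exact pvModDiv x N k hN0
      have e3 : PySem.Int.mod (PySem.Int.mod x (N ^ (k+1))) N = PySem.Int.mod x N := by
        rw [PySem.Int.mod_eq_emod_of_pos hp1, PySem.Int.mod_eq_emod_of_pos hN0,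
            PySem.Int.mod_eq_emod_of_pos hN0]
        exact Int.emod_emod_of_dvd x ⟨N ^ k, by ring⟩
      show PySem.Int.floordiv x (N ^ (k+1)) :: pvMsb N (k+1) (PySem.Int.mod x (N ^ (k+1)))
          = (PySem.Int.floordiv (PySem.Int.floordiv x N) (N ^ k)
              :: pvMsb N k (PySem.Int.mod (PySem.Int.floordiv x N) (N ^ k))) ++ [PySem.Int.mod x N]
      rw [ih _ hmnn hmlt, e1, e2, e3]
      rfl

theorem pvLsb_reverse (N : Int) (hN : 1 ≤ N) :
    ∀ (k : Nat) (x : Int), 0 ≤ x → x < N ^ k →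
      (pvLsb N k x).reverse = pvMsb N k x := by
  intro k
  induction k with
  | zero => intro x _ _; rfl
  | succ k ih =>
      intro x h0 hx
      have hN0 : (0:Int) < N := by omega
      have hdnn : 0 ≤ PySem.Int.floordiv x N := by
        rw [PySem.Int.floordiv_eq_ediv_of_pos hN0]; exact Int.ediv_nonneg h0 (by omega)
      have hdlt : PySem.Int.floordiv x N < N ^ k := by
        rw [PySem.Int.floordiv_eq_ediv_of_pos hN0]
        rw [Int.ediv_lt_iff_lt_mul hN0]
        calc x < N ^ (k+1) := hx
          _ = N ^ k * N := by rw [pow_succ]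
      show (PySem.Int.mod x N :: pvLsb N k (PySem.Int.floordiv x N)).reverse = pvMsb N (k+1) x
      rw [List.reverse_cons, ih _ hdnn hdlt, pvMsb_snoc N hN k x h0 hx]

theorem pvInnerScan_spec (cs : List Char) (p : Int) (hp : 1 ≤ p) :
    ∀ (m : Nat) (j0 : Int), j0 + (m : Int) = (cs.length : Int) → 1 ≤ m →
    ∀ (acc : List Char) (x : Int), 1 ≤ x → x ≤ ((cs.length : Int) - j0) * p →
      pvInnerScan cs (cs.length : Int) p (PySem.List.pyRange j0 (cs.length : Int) 1) acc x
        = (acc ++ [(PySem.List.pyGet? cs (PySem.Int.floordiv (x - 1) p)).getD ' '],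
           x - PySem.Int.floordiv (x - 1) p * p) := by
  intro m
  induction m with
  | zero => intro j0 _ h1; omega
  | succ m ih =>
      intro j0 hjm _ acc x hx hub
      have hlt : j0 < (cs.length : Int) := by omega
      rw [PySem.List.pyRange_one_cons hlt]
      simp only [pvInnerScan]
      by_cases hc : x > ((cs.length : Int) - j0 - 1) * p
      · rw [if_pos hc]
        have hd : PySem.Int.floordiv (x - 1) p = (cs.length : Int) - j0 - 1 :=
          pvFdEq (by omega) (by linarith) (by nlinarith)
        rw [hd]
      · rw [if_neg hc]
        push_neg at hc
        have hm1 : 1 ≤ m := by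
          rcases Nat.eq_zero_or_pos m with h | h
          · exfalso
            have hz : ((cs.length : Int) - j0 - 1) = 0 := by omega
            rw [hz, zero_mul] at hc
            omega
          · exact h
        exact ih (j0 + 1) (by omega) hm1 acc x hx (by nlinarith)

theorem pvFoldA (cs : List Char) (hN : 1 ≤ (cs.length : Int)) (L : Int) :
    ∀ (m : Nat) (s : Int), s + (m : Int) = L →
    ∀ (acc : List Char) (x : Int), 1 ≤ x →
      ((PySem.List.pyRange s L 1).foldl
        (fun (st : List Char × Int) i =>
          if st.2 > 1 ∧ st.2 > (cs.length : Int) ^ (L - i - 1).toNat then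
            pvInnerScan cs (cs.length : Int) ((cs.length : Int) ^ (L - i - 1).toNat)
              (PySem.List.pyRange 0 (cs.length : Int) 1) st.1 st.2
          else
            (st.1 ++ [(PySem.List.pyGet? cs 0).getD ' '], st.2))
        (acc, x)).1
      = acc ++ (pvMsb (cs.length : Int) m (min x ((cs.length : Int) ^ m) - 1)).map
          (fun d => (PySem.List.pyGet? cs d).getD ' ') := by
  intro m
  induction m with
  | zero =>
      intro s hs acc x hx
      have hnil : PySem.List.pyRange s L 1 = [] := by
        rw [PySem.List.pyRange_one]
        have h0 : (L - s).toNat = 0 := by omega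
        rw [h0]; rfl
      rw [hnil]
      simp [pvMsb]
  | succ m ih =>
      intro s hs acc x hx
      have hN0 : (0:Int) < (cs.length : Int) := by omega
      have hp0 : (0:Int) < (cs.length : Int) ^ m := by positivity
      have hpow1 : (1:Int) ≤ (cs.length : Int) ^ m := one_le_pow₀ hN
      have hmono : (cs.length : Int) ^ m ≤ (cs.length : Int) ^ (m+1) :=
        pow_le_pow_right₀ hN (by omega)
      have hps : (cs.length : Int) ^ (m+1) = (cs.length : Int) ^ m * (cs.length : Int) :=
        pow_succ _ _
      have hslt : s < L := by omega
      rw [PySem.List.pyRange_one_cons hslt, List.foldl_cons]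
      have hexp : (L - s - 1).toNat = m := by omega
      dsimp only
      rw [hexp]
      by_cases hcond : x > 1 ∧ x > (cs.length : Int) ^ m
      · rw [if_pos hcond]
        obtain ⟨hx1, hxp⟩ := hcond
        by_cases hbig : x > ((cs.length : Int) - 1) * (cs.length : Int) ^ m
        · -- the first candidate digit already matches
          have hc0 : x > ((cs.length : Int) - 0 - 1) * (cs.length : Int) ^ m := by
            simpa using hbig
          have hinit : pvInnerScan cs (cs.length : Int) ((cs.length : Int) ^ m)
              (PySem.List.pyRange 0 (cs.length : Int) 1) acc x
              = (acc ++ [(PySem.List.pyGet? cs ((cs.length : Int) - 0 - 1)).getD ' '],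
                 x - ((cs.length : Int) - 0 - 1) * (cs.length : Int) ^ m) := by
            rw [PySem.List.pyRange_one_cons hN0]
            simp only [pvInnerScan]
            rw [if_pos hc0]
          rw [hinit]
          have hx'1 : 1 ≤ x - ((cs.length : Int) - 0 - 1) * (cs.length : Int) ^ m := by linarith
          rw [ih (s+1) (by omega)
              (acc ++ [(PySem.List.pyGet? cs ((cs.length : Int) - 0 - 1)).getD ' '])
              (x - ((cs.length : Int) - 0 - 1) * (cs.length : Int) ^ m) hx'1]
          by_cases hov : x ≤ (cs.length : Int) ^ (m+1)
          · rw [min_eq_left hov]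
            have eA : PySem.Int.floordiv (x - 1) ((cs.length : Int) ^ m)
                = ((cs.length : Int) - 0 - 1) :=
              pvFdEq hp0 (by nlinarith) (by nlinarith)
            have eB : PySem.Int.mod (x - 1) ((cs.length : Int) ^ m)
                = min (x - ((cs.length : Int) - 0 - 1) * (cs.length : Int) ^ m)
                    ((cs.length : Int) ^ m) - 1 := by
              rw [pvMdEq hp0 eA]
              have hxle' : x - ((cs.length : Int) - 0 - 1) * (cs.length : Int) ^ m
                  ≤ (cs.length : Int) ^ m := by nlinarith
              rw [min_eq_left hxle']
              ring
            show acc ++ [(PySem.List.pyGet? cs ((cs.length : Int) - 0 - 1)).getD ' '] ++ _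
                = acc ++ List.map _
                    (PySem.Int.floordiv (x - 1) ((cs.length : Int) ^ m)
                      :: pvMsb (cs.length : Int) m (PySem.Int.mod (x - 1) ((cs.length : Int) ^ m)))
            rw [eA, eB, List.map_cons, List.append_assoc]
            rfl
          · push_neg at hov
            rw [min_eq_right (by linarith : (cs.length : Int) ^ (m+1) ≤ x)]
            have eA : PySem.Int.floordiv ((cs.length : Int) ^ (m+1) - 1) ((cs.length : Int) ^ m)
                = ((cs.length : Int) - 0 - 1) :=
              pvFdEq hp0 (by nlinarith) (by nlinarith)
            have eB : PySem.Int.mod ((cs.length : Int) ^ (m+1) - 1) ((cs.length : Int) ^ m)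
                = min (x - ((cs.length : Int) - 0 - 1) * (cs.length : Int) ^ m)
                    ((cs.length : Int) ^ m) - 1 := by
              rw [pvMdEq hp0 eA]
              have hge : (cs.length : Int) ^ m
                  ≤ x - ((cs.length : Int) - 0 - 1) * (cs.length : Int) ^ m := by nlinarith
              rw [min_eq_right hge, hps]
              ring
            show acc ++ [(PySem.List.pyGet? cs ((cs.length : Int) - 0 - 1)).getD ' '] ++ _
                = acc ++ List.map _
                    (PySem.Int.floordiv ((cs.length : Int) ^ (m+1) - 1) ((cs.length : Int) ^ m)
                      :: pvMsb (cs.length : Int) m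
                          (PySem.Int.mod ((cs.length : Int) ^ (m+1) - 1) ((cs.length : Int) ^ m)))
            rw [eA, eB, List.map_cons, List.append_assoc]
            rfl
        · -- the scan walks down to the matching digit
          push_neg at hbig
          have hcslen : (1:Nat) ≤ cs.length := by exact_mod_cast hN
          have hub : x ≤ ((cs.length : Int) - 0) * (cs.length : Int) ^ m := by nlinarith
          rw [pvInnerScan_spec cs ((cs.length : Int) ^ m) hpow1 cs.length 0 (by omega) hcslen
              acc x (by omega) hub]
          have hmodfact : PySem.Int.mod (x - 1) ((cs.length : Int) ^ m)
              = x - 1 - PySem.Int.floordiv (x - 1) ((cs.length : Int) ^ m) * (cs.length : Int) ^ m :=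
            pvMdEq hp0 rfl
          have hmnn : 0 ≤ PySem.Int.mod (x - 1) ((cs.length : Int) ^ m) := by
            rw [PySem.Int.mod_eq_emod_of_pos hp0]; exact Int.emod_nonneg _ (by omega)
          have hmlt : PySem.Int.mod (x - 1) ((cs.length : Int) ^ m) < (cs.length : Int) ^ m := by
            rw [PySem.Int.mod_eq_emod_of_pos hp0]; exact Int.emod_lt_of_pos _ hp0
          have hx'1 : 1 ≤ x - PySem.Int.floordiv (x - 1) ((cs.length : Int) ^ m)
              * (cs.length : Int) ^ m := by linarith
          rw [ih (s+1) (by omega)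
              (acc ++ [(PySem.List.pyGet? cs
                (PySem.Int.floordiv (x - 1) ((cs.length : Int) ^ m))).getD ' '])
              (x - PySem.Int.floordiv (x - 1) ((cs.length : Int) ^ m) * (cs.length : Int) ^ m) hx'1]
          have hxle2 : x ≤ (cs.length : Int) ^ (m+1) := by nlinarith
          rw [min_eq_left hxle2]
          have eB : PySem.Int.mod (x - 1) ((cs.length : Int) ^ m)
              = min (x - PySem.Int.floordiv (x - 1) ((cs.length : Int) ^ m) * (cs.length : Int) ^ m)
                  ((cs.length : Int) ^ m) - 1 := by
            have hle : x - PySem.Int.floordiv (x - 1) ((cs.length : Int) ^ m)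
                * (cs.length : Int) ^ m ≤ (cs.length : Int) ^ m := by linarith
            rw [min_eq_left hle]
            linarith
          show acc ++ [(PySem.List.pyGet? cs
                (PySem.Int.floordiv (x - 1) ((cs.length : Int) ^ m))).getD ' '] ++ _
              = acc ++ List.map _
                  (PySem.Int.floordiv (x - 1) ((cs.length : Int) ^ m)
                    :: pvMsb (cs.length : Int) m (PySem.Int.mod (x - 1) ((cs.length : Int) ^ m)))
          rw [eB, List.map_cons, List.append_assoc]
          rfl
      · rw [if_neg hcond]
        have hxle : x ≤ (cs.length : Int) ^ m := by
          rcases not_and_or.mp hcond with h | h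
          · push_neg at h; linarith
          · push_neg at h; exact h
        rw [ih (s+1) (by omega) (acc ++ [(PySem.List.pyGet? cs 0).getD ' ']) x hx]
        rw [min_eq_left hxle, min_eq_left (le_trans hxle hmono)]
        have e0 : PySem.Int.floordiv (x - 1) ((cs.length : Int) ^ m) = 0 := by
          rw [PySem.Int.floordiv_eq_ediv_of_pos hp0]
          exact Int.ediv_eq_zero_of_lt (by omega) (by linarith)
        have e1 : PySem.Int.mod (x - 1) ((cs.length : Int) ^ m) = x - 1 := by
          rw [PySem.Int.mod_eq_emod_of_pos hp0]
          exact Int.emod_eq_of_lt (by omega) (by linarith)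
        show acc ++ [(PySem.List.pyGet? cs 0).getD ' '] ++ _
            = acc ++ List.map _
                (PySem.Int.floordiv (x - 1) ((cs.length : Int) ^ m)
                  :: pvMsb (cs.length : Int) m (PySem.Int.mod (x - 1) ((cs.length : Int) ^ m)))
        rw [e0, e1, List.map_cons, List.append_assoc]
        rfl

theorem pvFoldB (cs : List Char) :
    ∀ (l : List Int) (acc : List Char) (x : Int),
      ((l.foldl
        (fun (st : List Char × Int) _ =>
          (st.1 ++ [(PySem.List.pyGet? cs (PySem.Int.mod st.2 (cs.length : Int))).getD ' '],
           PySem.Int.floordiv st.2 (cs.length : Int)))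
        (acc, x)).1)
      = acc ++ (pvLsb (cs.length : Int) l.length x).map
          (fun d => (PySem.List.pyGet? cs d).getD ' ') := by
  intro l
  induction l with
  | nil => intro acc x; simp [pvLsb]
  | cons h t ihl =>
      intro acc x
      rw [List.foldl_cons]
      dsimp only
      rw [ihl]
      show _ = acc ++ List.map _
          (PySem.Int.mod x (cs.length : Int)
            :: pvLsb (cs.length : Int) t.length (PySem.Int.floordiv x (cs.length : Int)))
      rw [List.map_cons, List.append_assoc]
      rfl

-- ===== VERDICT (by name: the statement is the Claim_ definition above) =====
theorem generate_name_fixed_spec : Claim_equal_generate_name_fixed := by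
  intro num co L _hdom
  unfold Spec_generate_name_fixed
  unfold generate_name_fixed generate_name_fixed_alt
  rw [PySem.Str.len_eq]
  by_cases hg : num < 1 ∨ ((co.toList.length : Int)) < 1 ∨ L < 1
  · rw [if_pos hg, if_pos hg]
  · rw [if_neg hg, if_neg hg]
    push_neg at hg
    obtain ⟨h1, h2, h3⟩ := hg
    dsimp only
    have hcs : (1:Int) ≤ (co.toList.length : Int) := by omega
    have hp1L : (1:Int) ≤ (co.toList.length : Int) ^ L.toNat := one_le_pow₀ hcs
    refine congrArg String.ofList ?_
    rw [pvFoldA co.toList hcs L L.toNat 0 (by omega) [] num (by omega)]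
    rw [pvFoldB co.toList (PySem.List.pyRange 0 L 1) []
        (min num ((co.toList.length : Int) ^ L.toNat) - 1)]
    rw [PySem.List.length_pyRange_one]
    have hLt : (L - 0).toNat = L.toNat := by omega
    rw [hLt]
    rw [List.nil_append, List.nil_append]
    rw [← List.map_reverse]
    have h0 : 0 ≤ min num ((co.toList.length : Int) ^ L.toNat) - 1 := by
      have hmn := le_min (show (1:Int) ≤ num by omega) hp1L
      linarith
    have hltp : min num ((co.toList.length : Int) ^ L.toNat) - 1
        < (co.toList.length : Int) ^ L.toNat := by
      have := min_le_right num ((co.toList.length : Int) ^ L.toNat)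
      linarith
    rw [pvLsb_reverse (co.toList.length : Int) hcs L.toNat _ h0 hltp]
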